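-- pv_equiv track=rewrite | github.com/FHuang21/6.009_Labs | lab05.py | assign_one_student
-- ===== SOURCE A (Python) =====
-- def combinations(a_list, length):
--     '''
--     return list of lists containing all combinations of length n of elements in a list
--     '''
--     combo_list = []
--     #base case
--     if length == 0:
--         return [[]]
--
--     for i in range(len(a_list)):
--         current = a_list[i]
--         remaining_list = a_list[i+1:]
--         #recursive function
--         for pos in combinations(remaining_list, length - 1):
--             combo_list.append([current] + pos)
--     return combo_list
--
-- def assign_one_student(student_preferences,room_capacities):
--     formula = []
--     rooms = []
--     #for each room in all rooms
--     for room in room_capacities: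
--         rooms.append(room)
--     #for each student in all students
--     for student in student_preferences:
--         combo_list = []
--         for room in rooms: #makes list of literals
--             combo_list.append((student + '_' + room, False))
--         new_combo_list = combinations(combo_list, 2) #uses combinations helper function to find new list of combinations of literals
--         formula.extend(new_combo_list)
--     return formula
-- ===== SOURCE B (Python) =====
-- def assign_one_student(student_preferences, room_capacities):
--     formula = []
--     rooms = list(room_capacities)
--     for student in student_preferences:
--         lits = [(student + '_' + room, False) for room in rooms]
--         n = len(lits)
--         for i in range(n):
--             for j in range(i + 1, n):
--                 formula.append([lits[i], lits[j]])
--     return formula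
-- ===== Notes on version B (the rewrite author's own statement) =====
-- stated objective: simpler
-- what changed: Replaced the recursive combinations helper (which slices and recurses to enumerate length-2 subsets) with a direct nested i<j index loop appending each pair, removing the helper entirely.
import Mathlib
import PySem

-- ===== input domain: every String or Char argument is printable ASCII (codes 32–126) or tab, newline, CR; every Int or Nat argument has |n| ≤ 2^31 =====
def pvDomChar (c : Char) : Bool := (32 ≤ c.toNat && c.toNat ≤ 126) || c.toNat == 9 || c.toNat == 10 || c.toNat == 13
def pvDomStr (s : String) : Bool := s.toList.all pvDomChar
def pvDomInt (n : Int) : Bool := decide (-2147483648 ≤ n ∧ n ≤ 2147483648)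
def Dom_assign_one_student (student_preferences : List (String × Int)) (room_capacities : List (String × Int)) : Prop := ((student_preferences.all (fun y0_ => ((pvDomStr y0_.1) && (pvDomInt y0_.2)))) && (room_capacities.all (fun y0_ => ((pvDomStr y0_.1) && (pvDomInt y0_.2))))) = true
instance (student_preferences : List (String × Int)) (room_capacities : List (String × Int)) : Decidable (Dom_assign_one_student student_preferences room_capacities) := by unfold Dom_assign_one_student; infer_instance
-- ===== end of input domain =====

-- ===== PORT A =====
-- B drops A's recursive combinations helper for a direct nested i<j index loop; same output.
-- Dict arguments are association lists; iterating a Python dict yields its distinct keys in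
-- first-insertion order, ported as PySem.List.dedup of the key list.

-- helper 'combinations' of A: recursion on the list; each loop iteration takes the head as
-- 'current' and the tail as 'remaining_list'; the rest of the loop is the recursion on the tail.
def pvComb (a_list : List (String × Bool)) (length : Int) : List (List (String × Bool)) :=
  if length = 0 then [[]]
  else
    match a_list with
    | [] => []
    | current :: remaining =>
        ((pvComb remaining (length - 1)).map (fun pos => current :: pos))
          ++ pvComb remaining length

def assign_one_student (student_preferences : List (String × Int)) (room_capacities : List (String × Int)) : List (List (String × Bool)) :=
  let rooms := (PySem.List.dedup (room_capacities.map (·.1))).foldl (fun rs room => rs ++ [room]) []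
  (PySem.List.dedup (student_preferences.map (·.1))).foldl
    (fun formula student =>
      let combo_list := rooms.foldl (fun cl room => cl ++ [(student ++ "_" ++ room, false)]) []
      formula ++ pvComb combo_list 2) []

-- ===== PORT B =====
def assign_one_student_alt (student_preferences : List (String × Int)) (room_capacities : List (String × Int)) : List (List (String × Bool)) :=
  let rooms := PySem.List.dedup (room_capacities.map (·.1))
  (PySem.List.dedup (student_preferences.map (·.1))).foldl
    (fun formula student =>
      let lits := rooms.map (fun room => (student ++ "_" ++ room, false))
      let n : Int := lits.length
      (PySem.List.pyRange 0 n 1).foldl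
        (fun f i =>
          (PySem.List.pyRange (i + 1) n 1).foldl
            (fun f j => f ++ [[PySem.List.pyGetD lits i ("", false), PySem.List.pyGetD lits j ("", false)]]) f)
        formula)
    []

-- ===== PRECONDITION & SPEC =====
def Spec_assign_one_student (student_preferences : List (String × Int)) (room_capacities : List (String × Int)) (out : List (List (String × Bool))) : Prop := out = assign_one_student_alt student_preferences room_capacities
instance (student_preferences : List (String × Int)) (room_capacities : List (String × Int)) (out : List (List (String × Bool))) : Decidable (Spec_assign_one_student student_preferences room_capacities out) := by unfold Spec_assign_one_student; infer_instance

-- ===== CLAIM (what is proved, stated in full; the proofs are below) =====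
def Claim_equal_assign_one_student : Prop := ∀ (student_preferences : List (String × Int)) (room_capacities : List (String × Int)), Dom_assign_one_student student_preferences room_capacities → Spec_assign_one_student student_preferences room_capacities (assign_one_student student_preferences room_capacities)

-- ===== LEMMAS AND PROOFS =====

lemma pvComb_zero (ys : List (String × Bool)) : pvComb ys 0 = [[]] := by
  rw [pvComb.eq_def]; simp

lemma pvComb_succ_nil (k : Int) (hk : k ≠ 0) : pvComb [] k = [] := by
  rw [pvComb.eq_def]; simp [hk]

lemma pvComb_one (ys : List (String × Bool)) : pvComb ys 1 = ys.map (fun z => [z]) := by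
  induction ys with
  | nil => simp [pvComb]
  | cons y ys ih => rw [pvComb.eq_def]; simp [ih, pvComb_zero]

lemma pvComb_two_cons (y : String × Bool) (ys : List (String × Bool)) :
    pvComb (y :: ys) 2 = ys.map (fun z => [y, z]) ++ pvComb ys 2 := by
  rw [pvComb.eq_def]
  simp [pvComb_one, List.map_map, Function.comp]

-- the nested index loops of B, starting at index a, produce exactly pvComb (xs.drop a) 2
lemma pairs_eq_comb (xs : List (String × Bool)) :
    ∀ (m a : Nat), a + m = xs.length →
    (PySem.List.pyRange (a : Int) (xs.length : Int) 1).flatMap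
        (fun i => (PySem.List.pyRange (i + 1) (xs.length : Int) 1).map
          (fun j => [PySem.List.pyGetD xs i ("", false), PySem.List.pyGetD xs j ("", false)]))
      = pvComb (xs.drop a) 2 := by
  intro m
  induction m with
  | zero =>
      intro a ha
      rw [PySem.List.pyRange_one_eq_nil (by omega)]
      rw [List.drop_of_length_le (by omega)]; exact pvComb_succ_nil 2 (by norm_num)
  | succ m ih =>
      intro a ha
      have halt : a < xs.length := by omega
      rw [PySem.List.pyRange_one_cons (by exact_mod_cast halt)]
      rw [List.flatMap_cons]
      have hcast : ((a : Int) + 1) = ((a + 1 : Nat) : Int) := by push_cast; ring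
      have hdrop : xs.drop a = xs[a] :: xs.drop (a + 1) := (List.getElem_cons_drop halt).symm
      have hhead : PySem.List.pyGetD xs (a : Int) ("", false) = xs[a] := by
        simpa using PySem.List.pyGetD_eq_getElem (xs := xs) (i := (a : Int)) (d := ("", false))
          (by positivity) (by exact_mod_cast halt)
      have hmap :
          (PySem.List.pyRange ((a : Int) + 1) (xs.length : Int) 1).map
              (fun j => [PySem.List.pyGetD xs (a : Int) ("", false), PySem.List.pyGetD xs j ("", false)])
            = (xs.drop (a + 1)).map (fun z => [xs[a], z]) := by
        have hbase := PySem.List.map_pyGetD_pyRange' (xs := xs) (a := (a : Int) + 1)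
          (d := ("", false)) (by positivity)
        calc (PySem.List.pyRange ((a : Int) + 1) (xs.length : Int) 1).map
              (fun j => [PySem.List.pyGetD xs (a : Int) ("", false), PySem.List.pyGetD xs j ("", false)])
            = ((PySem.List.pyRange ((a : Int) + 1) (xs.length : Int) 1).map
                (fun j => PySem.List.pyGetD xs j ("", false))).map (fun z => [xs[a], z]) := by
              rw [List.map_map]; simp [Function.comp, hhead]
          _ = (xs.drop (a + 1)).map (fun z => [xs[a], z]) := by
              rw [hbase]
              norm_num [Int.toNat_natCast]
      rw [hmap, hcast, ih (a + 1) (by omega), hdrop, pvComb_two_cons]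

-- ===== VERDICT (by name: the statement is the Claim_ definition above) =====
theorem assign_one_student_spec : Claim_equal_assign_one_student := by
  intro sp rc _
  unfold Spec_assign_one_student assign_one_student assign_one_student_alt
  simp only [PySem.List.foldl_append_singleton_eq_self, List.nil_append]
  apply PySem.List.foldl_congr_mem
  intro formula student _
  simp only [PySem.List.foldl_append_singleton_eq_map, List.nil_append,
    PySem.List.foldl_append_eq_flatMap]
  congr 1
  have h := pairs_eq_comb
    (List.map (fun r => (student ++ "_" ++ r, false)) (PySem.List.dedup (List.map (fun x => x.1) rc)))
    (List.map (fun r => (student ++ "_" ++ r, false)) (PySem.List.dedup (List.map (fun x => x.1) rc))).length 0 (by omega)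
  simpa using h.symm
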